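-- pv_equiv track=rewrite | github.com/formula1kimi/test | algorithm/range2mask/a.py | range2match
-- ===== SOURCE A (Python) =====
-- def zero_trail_num(n):
--     for zn in range(1, 32):
--         mask = ((1 << zn) - 1)
--         mask_n = n & mask
--         if mask_n == 0:
--             continue
--         else:
--             return zn-1
--
-- def range2match(n1, n2):
--     rules = []
--     n = n1
--     while n <= n2:
--         # 当前数值在二进制上，末尾有几个0
--         zn = zero_trail_num(n)
--         while zn >= 0:
--             if zn == 0:
--                 # 如果一个0都没有，无法用更多的mask来匹配，只能用全1.
--                 # 这个数只能用这个rule来匹配。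
--                 r = (n, 0xFFFFFFFF)
--                 rules.append(r)
--                 # 从下一个数继续开始
--                 n = n + 1
--                 break
--             else:
--                 # 查看用n和n的末尾0个数组成的mask的规则，可以覆盖到最大的数是多少：nx
--                 nx = n | ((1 << zn) - 1)
--                 if nx <= n2:
--                     # nx没有超过n2的大小，我们添加这个规则。
--                     r = (n, (0xffffffff>>zn)<<zn)
--                     rules.append(r)
--                     # 从下一个数继续开始。nx + 1 实际上一定是比当前的n多了1个0. 是一个更大的范围。
--                     # 问题挑战：前面计算出来的rules，是否可以合并成一个大的rule?
--                     n = nx + 1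
--                     break
--                 else:
--                     # 说明当前的zn作为mask的范围太大，超过n2。只能尝试减小zn，找到最合适的zn。
--                     zn = zn - 1
--     return rules
-- ===== SOURCE B (Python) =====
-- def zero_trail_num(n):
--     for zn in range(1, 32):
--         mask = ((1 << zn) - 1)
--         mask_n = n & mask
--         if mask_n == 0:
--             continue
--         else:
--             return zn-1
--
-- def range2match(n1, n2):
--     # For each n: block size = min(trailing zeros of n, largest power of two <= n2-n+1)
--     rules = []
--     n = n1
--     while n <= n2:
--         tz = zero_trail_num(n)
--         maxfit = (n2 - n + 1).bit_length() - 1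
--         zn = min(tz, maxfit)
--         rules.append((n, (0xffffffff >> zn) << zn))
--         n += 1 << zn
--     return rules
-- ===== Notes on version B (the rewrite author's own statement) =====
-- stated objective: simpler
-- what changed: A's inner while-loop that decrements zn until the masked block fits is replaced by a closed-form choice zn = min(zero_trail_num(n), (n2-n+1).bit_length()-1), emitting one rule per outer iteration and unifying A's special zn==0 branch into the general formula.
import Mathlib
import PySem

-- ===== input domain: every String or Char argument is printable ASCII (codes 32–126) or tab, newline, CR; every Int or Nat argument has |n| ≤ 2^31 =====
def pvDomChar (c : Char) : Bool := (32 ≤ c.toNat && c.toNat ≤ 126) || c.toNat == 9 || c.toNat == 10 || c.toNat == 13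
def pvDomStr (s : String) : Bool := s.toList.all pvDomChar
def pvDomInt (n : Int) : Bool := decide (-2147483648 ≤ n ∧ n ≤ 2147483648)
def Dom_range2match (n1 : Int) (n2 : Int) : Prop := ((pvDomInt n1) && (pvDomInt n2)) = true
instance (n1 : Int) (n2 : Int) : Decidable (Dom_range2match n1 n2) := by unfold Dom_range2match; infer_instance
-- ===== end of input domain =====

-- B replaces A's inner decrement search for the block size by a closed-form
-- min(trailing zeros, bit_length(remaining)-1); objective: simpler.

-- ===== PORT A =====

-- for zn in range(1, 32): if n & ((1<<zn)-1) == 0 continue else return zn-1   (falls off the end → None)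
def ztnLoop (n : Int) (l : List Int) : Option Int :=
  match l with
  | [] => none
  | zn :: rest =>
      if PySem.Int.band n ((1 <<< zn.toNat) - 1) = 0 then ztnLoop n rest
      else some (zn - 1)

def zero_trail_num (n : Int) : Option Int :=
  ztnLoop n (PySem.List.pyRange 1 32 1)

-- A's inner `while zn >= 0` loop: returns the appended rule and the new n (one break per entry);
-- `none` = the loop fell through without a break (never happens starting from a zero_trail_num value).
def innerA (n2 n zn : Int) : Option ((Int × Int) × Int) :=
  if zn < 0 then none
  else if zn = 0 then some ((n, (0xFFFFFFFF : Int)), n + 1)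
  else
    let nx := PySem.Int.bor n ((1 <<< zn.toNat) - 1)
    if nx ≤ n2 then some ((n, ((0xffffffff : Int) >>> zn.toNat) <<< zn.toNat), nx + 1)
    else innerA n2 n (zn - 1)
  termination_by zn.toNat
  decreasing_by omega

-- A's outer `while n <= n2` loop; fuel n2+1-n1 suffices (n grows by at least 1 per emitted rule);
-- the `none` escapes are where the Python raises TypeError (excluded by Pre_).
def loopA (n2 : Int) : Nat → Int → List (Int × Int) → List (Int × Int)
  | 0, _, rules => rules
  | fuel + 1, n, rules =>
      if n ≤ n2 then
        match zero_trail_num n with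
        | none => rules
        | some zn =>
            match innerA n2 n zn with
            | none => rules
            | some (r, n') => loopA n2 fuel n' (rules ++ [r])
      else rules

def range2match (n1 : Int) (n2 : Int) : List (Int × Int) :=
  loopA n2 (n2 + 1 - n1).toNat n1 []

-- ===== PORT B =====

-- B's `while n <= n2` loop (fuel totalization as for A; same escape where Python's min(None, _) raises)
def loopB (n2 : Int) : Nat → Int → List (Int × Int) → List (Int × Int)
  | 0, _, rules => rules
  | fuel + 1, n, rules =>
      if n ≤ n2 then
        match zero_trail_num n with
        | none => rules
        | some tz =>
            let maxfit : Int := (PySem.Int.bitLength (n2 - n + 1) : Int) - 1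
            let zn := min tz maxfit
            loopB n2 fuel (n + (1 <<< zn.toNat))
              (rules ++ [(n, ((0xffffffff : Int) >>> zn.toNat) <<< zn.toNat)])
      else rules

def range2match_alt (n1 : Int) (n2 : Int) : List (Int × Int) :=
  loopB n2 (n2 + 1 - n1).toNat n1 []

-- ===== PRECONDITION & SPEC =====
-- Pre_ excludes exactly the inputs where Python A raises TypeError: some multiple of 2^31 lies in
-- [n1, n2] (zero_trail_num returns None there, and `None >= 0` raises). Equivalently: the largest
-- multiple of 2^31 not exceeding n2 is below n1.
def Pre_range2match (n1 : Int) (n2 : Int) : Prop :=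
  n2 - n2 % 2147483648 < n1
instance (n1 : Int) (n2 : Int) : Decidable (Pre_range2match n1 n2) := by
  unfold Pre_range2match; infer_instance

def pvWitness_range2match : Int × Int := (3, 300)

def Spec_range2match (n1 : Int) (n2 : Int) (out : List (Int × Int)) : Prop := out = range2match_alt n1 n2
instance (n1 : Int) (n2 : Int) (out : List (Int × Int)) : Decidable (Spec_range2match n1 n2 out) := by unfold Spec_range2match; infer_instance

-- ===== CLAIM (what is proved, stated in full; the proofs are below) =====
def Claim_equal_range2match : Prop := ∀ (n1 : Int) (n2 : Int), Dom_range2match n1 n2 → Pre_range2match n1 n2 → Spec_range2match n1 n2 (range2match n1 n2)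

-- ===== LEMMAS AND PROOFS =====

lemma pv_shift_one (k : Nat) : (((1 <<< k : Nat)) : Int) = 2 ^ k := by
  push_cast [Nat.shiftLeft_eq]
  ring

lemma pv_mask_cast (k : Nat) : (((1 <<< k : Nat)) : Int) - 1 = ((2 ^ k - 1 : Nat) : Int) := by
  rw [pv_shift_one, Nat.cast_sub Nat.one_le_two_pow]
  push_cast
  ring

lemma pv_succ_mod (K p : Nat) (hK : 0 < K) : (p + 1) % K = 0 ↔ p % K = K - 1 := by
  have h1 : (p + 1) % K = (p % K + 1) % K := by
    conv_lhs => rw [← Nat.div_add_mod p K]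
    rw [Nat.add_assoc, Nat.mul_add_mod]
  have hr : p % K < K := Nat.mod_lt _ hK
  set r := p % K with hrdef
  by_cases hc : r + 1 = K
  · rw [h1, hc, Nat.mod_self]
    constructor
    · intro _; omega
    · intro _; rfl
  · rw [h1, Nat.mod_eq_of_lt (by omega)]
    constructor
    · intro h; omega
    · intro h; omega

-- n & ((1 << k) - 1) == 0  is exactly  2^k ∣ n  (Python-exact also for negative n)
lemma band_mask_eq_zero_iff (n : Int) (k : Nat) :
    PySem.Int.band n (((1 <<< k : Nat) : Int) - 1) = 0 ↔ ((2:Int) ^ k ∣ n) := by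
  have hpow : ((2:Int) ^ k) = ((2 ^ k : Nat) : Int) := by push_cast; ring
  rw [pv_mask_cast]
  by_cases hn : 0 ≤ n
  · rw [PySem.Int.band_of_nonneg hn (by positivity)]
    rw [Int.toNat_natCast, Nat.and_two_pow_sub_one_eq_mod]
    rw [Nat.cast_eq_zero]
    constructor
    · intro h
      have h' : 2 ^ k ∣ n.toNat := Nat.dvd_of_mod_eq_zero h
      have h'' := Int.natCast_dvd_natCast.mpr h'
      rwa [Int.toNat_of_nonneg hn, ← hpow] at h''
    · intro h
      apply Nat.mod_eq_zero_of_dvd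
      have h' : ((2:Int) ^ k ∣ (n.toNat : Int)) := by rwa [Int.toNat_of_nonneg hn]
      rw [hpow] at h'
      exact_mod_cast h'
  · have hb : (0:Int) ≤ ((2 ^ k - 1 : Nat) : Int) := by positivity
    rw [PySem.Int.band]
    rw [if_neg (by omega), if_pos hb]
    rw [Int.toNat_natCast]
    have hp : ((-n - 1).toNat : Int) = -n - 1 := Int.toNat_of_nonneg (by omega)
    set p := (-n - 1).toNat with hpdef
    have hand : 2 ^ k - 1 &&& p = p % 2 ^ k := by
      rw [Nat.and_comm, Nat.and_two_pow_sub_one_eq_mod]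
    rw [hand, Nat.cast_eq_zero]
    have hplt : p % 2 ^ k < 2 ^ k := Nat.mod_lt _ (by positivity)
    have hple : p % 2 ^ k ≤ 2 ^ k - 1 := Nat.le_pred_of_lt hplt
    rw [Nat.sub_eq_zero_iff_le]
    have hneg : (-n : Int) = ((p + 1 : Nat) : Int) := by push_cast; omega
    constructor
    · intro h
      have hmod : p % 2 ^ k = 2 ^ k - 1 := le_antisymm hple h
      have hdvd : 2 ^ k ∣ p + 1 :=
        Nat.dvd_of_mod_eq_zero ((pv_succ_mod _ _ (by positivity)).mpr hmod)
      have h' : ((2:Int) ^ k ∣ ((p + 1 : Nat) : Int)) := by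
        rw [hpow]; exact_mod_cast hdvd
      rw [← hneg] at h'
      exact (Int.dvd_neg).mp h'
    · intro h
      have h' : (2:Int) ^ k ∣ -n := (Int.dvd_neg).mpr h
      rw [hneg, hpow] at h'
      have hdvd : 2 ^ k ∣ p + 1 := by exact_mod_cast h'
      have hmod : p % 2 ^ k = 2 ^ k - 1 :=
        (pv_succ_mod _ _ (by positivity)).mp (Nat.mod_eq_zero_of_dvd hdvd)
      rw [hmod]

-- when 2^k divides n, or-ing in the low mask is adding it (Python-exact also for negative n)
lemma bor_mask_of_dvd (n : Int) (k : Nat) (h : (2:Int) ^ k ∣ n) :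
    PySem.Int.bor n (((1 <<< k : Nat) : Int) - 1) = n + (((1 <<< k : Nat) : Int) - 1) := by
  have hpow : ((2:Int) ^ k) = ((2 ^ k : Nat) : Int) := by push_cast; ring
  rw [pv_mask_cast]
  by_cases hn : 0 ≤ n
  · rw [PySem.Int.bor_of_nonneg hn (by positivity)]
    rw [Int.toNat_natCast]
    obtain ⟨q, hq⟩ : 2 ^ k ∣ n.toNat := by
      have h' : ((2 ^ k : Nat) : Int) ∣ ((n.toNat : Nat) : Int) := by
        rw [Int.toNat_of_nonneg hn, ← hpow]; exact h
      exact_mod_cast h'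
    have hlt : 2 ^ k - 1 < 2 ^ k := by
      have h0 : (0:Nat) < 2 ^ k := by positivity
      omega
    have hor : n.toNat ||| (2 ^ k - 1) = n.toNat + (2 ^ k - 1) := by
      rw [hq, Nat.mul_comm, ← Nat.shiftLeft_eq, ← Nat.shiftLeft_add_eq_or_of_lt hlt]
    rw [hor, Nat.cast_add, Int.toNat_of_nonneg hn]
  · have hb : (0:Int) ≤ ((2 ^ k - 1 : Nat) : Int) := by positivity
    rw [PySem.Int.bor]
    rw [if_neg (by omega), if_pos hb]
    rw [Int.toNat_natCast]
    have hp : ((-n - 1).toNat : Int) = -n - 1 := Int.toNat_of_nonneg (by omega)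
    set p := (-n - 1).toNat with hpdef
    have hneg : (-n : Int) = ((p + 1 : Nat) : Int) := by push_cast; omega
    have hdvd : 2 ^ k ∣ p + 1 := by
      have h' : (2:Int) ^ k ∣ -n := (Int.dvd_neg).mpr h
      rw [hneg, hpow] at h'
      exact_mod_cast h'
    have hmod : p % 2 ^ k = 2 ^ k - 1 :=
      (pv_succ_mod _ _ (by positivity)).mp (Nat.mod_eq_zero_of_dvd hdvd)
    have hand : p &&& (2 ^ k - 1) = 2 ^ k - 1 := by
      rw [Nat.and_two_pow_sub_one_eq_mod, hmod]
    rw [hand]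
    have hge : 2 ^ k - 1 ≤ p := by
      have := Nat.mod_le p (2 ^ k)
      omega
    rw [Nat.cast_sub hge, Nat.cast_sub Nat.one_le_two_pow]
    push_cast
    have hp' : (p : Int) = -n - 1 := hp
    rw [hp']
    ring

-- the for-loop of zero_trail_num, from zn = a on, given that all lower masks vanished
lemma ztnLoop_spec (n : Int) (hn : ¬ ((2:Int) ^ 31 ∣ n)) :
    ∀ (d a : Nat), a + d = 32 → 1 ≤ a → ((2:Int) ^ (a - 1) ∣ n) →
    ∃ t : Nat, ztnLoop n (PySem.List.pyRange (a : Int) 32 1) = some ((t : Int)) ∧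
      t ≤ 30 ∧ (2:Int) ^ t ∣ n := by
  intro d
  induction d with
  | zero =>
      intro a ha h1 hd
      exfalso
      have h32 : a = 32 := by omega
      subst h32
      exact hn (by simpa using hd)
  | succ d ih =>
      intro a ha h1 hd
      have hlt : (a : Int) < 32 := by exact_mod_cast (show a < 32 by omega)
      rw [PySem.List.pyRange_one_cons hlt]
      simp only [ztnLoop, Int.toNat_natCast]
      by_cases hc : PySem.Int.band n (((1 <<< a : Nat) : Int) - 1) = 0
      · rw [if_pos hc]
        have hd' : (2:Int) ^ a ∣ n := (band_mask_eq_zero_iff n a).mp hc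
        have hrec := ih (a + 1) (by omega) (by omega) (by simpa using hd')
        rw [show ((a : Int) + 1) = ((a + 1 : Nat) : Int) by push_cast; ring]
        exact hrec
      · rw [if_neg hc]
        refine ⟨a - 1, ?_, by omega, hd⟩
        rw [Nat.cast_sub h1]
        rfl

lemma ztn_spec (n : Int) (hn : ¬ ((2:Int) ^ 31 ∣ n)) :
    ∃ t : Nat, zero_trail_num n = some ((t : Int)) ∧ t ≤ 30 ∧ (2:Int) ^ t ∣ n := by
  have h := ztnLoop_spec n hn 31 1 (by omega) (by omega) (by simp)
  simpa [zero_trail_num] using h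

lemma pv_bitLength_pos (L : Int) (hL : 1 ≤ L) : 1 ≤ PySem.Int.bitLength L := by
  by_contra h
  have h0 : PySem.Int.bitLength L = 0 := by omega
  have hub := PySem.Int.lt_two_pow_bitLength L
  rw [h0] at hub
  simp at hub
  omega

-- 2^j fits into L exactly when j ≤ bit_length(L) - 1
lemma pv_pow_le_iff (L : Int) (hL : 1 ≤ L) (j : Nat) :
    ((2:Int) ^ j ≤ L ↔ j ≤ PySem.Int.bitLength L - 1) := by
  have hub := PySem.Int.lt_two_pow_bitLength L
  have hlb := PySem.Int.two_pow_bitLength_le L (by omega)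
  have hcast : (L.natAbs : Int) = L := Int.natAbs_of_nonneg (by omega)
  have hbl := pv_bitLength_pos L hL
  constructor
  · intro h
    have h1 : (2:Nat) ^ j ≤ L.natAbs := by
      have h' : ((2 ^ j : Nat) : Int) ≤ (L.natAbs : Int) := by
        rw [hcast]; push_cast; exact h
      exact_mod_cast h'
    have h2 : (2:Nat) ^ j < 2 ^ (PySem.Int.bitLength L) := lt_of_le_of_lt h1 hub
    have h3 := (Nat.pow_lt_pow_iff_right (by omega : 1 < 2)).mp h2
    omega
  · intro h
    have h1 : (2:Nat) ^ j ≤ 2 ^ (PySem.Int.bitLength L - 1) :=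
      Nat.pow_le_pow_right (by omega) h
    have h2 : (2:Nat) ^ j ≤ L.natAbs := le_trans h1 hlb
    calc (2:Int) ^ j = ((2 ^ j : Nat) : Int) := by push_cast; ring
      _ ≤ (L.natAbs : Int) := by exact_mod_cast h2
      _ = L := hcast

-- A's inner decrement loop picks exactly min(t, bit_length(n2-n+1)-1) as the block exponent
lemma innerA_spec (n2 n : Int) (t : Nat) (hn : n ≤ n2) (hd : (2:Int) ^ t ∣ n) :
    innerA n2 n (t : Int) =
      some ((n, ((0xffffffff : Int) >>> (min t (PySem.Int.bitLength (n2 - n + 1) - 1))) <<<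
                  (min t (PySem.Int.bitLength (n2 - n + 1) - 1))),
        n + 2 ^ (min t (PySem.Int.bitLength (n2 - n + 1) - 1))) := by
  have hL : 1 ≤ n2 - n + 1 := by omega
  revert hd
  induction t with
  | zero =>
      intro _
      rw [innerA]
      rw [if_neg (by norm_num), if_pos (by norm_num)]
      simp
  | succ t ih =>
      intro hd
      have hd' : (2:Int) ^ t ∣ n := dvd_trans (pow_dvd_pow 2 (Nat.le_succ t)) hd
      rw [innerA]
      rw [if_neg (by push_cast; omega), if_neg (by push_cast; omega)]
      simp only [Int.toNat_natCast]
      have hbor := bor_mask_of_dvd n (t + 1) hd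
      by_cases hcond : PySem.Int.bor n (((1 <<< (t + 1) : Nat) : Int) - 1) ≤ n2
      · have h2 : (2:Int) ^ (t + 1) ≤ n2 - n + 1 := by
          rw [hbor, pv_shift_one] at hcond
          linarith
        have hj : t + 1 ≤ PySem.Int.bitLength (n2 - n + 1) - 1 :=
          (pv_pow_le_iff _ hL (t + 1)).mp h2
        have hmin : min (t + 1) (PySem.Int.bitLength (n2 - n + 1) - 1) = t + 1 :=
          min_eq_left hj
        simp only [if_pos hcond, hmin]
        congr 2
        rw [hbor, pv_shift_one]
        ring
      · simp only [if_neg hcond]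
        rw [show ((t + 1 : Nat) : Int) - 1 = (t : Int) by push_cast; ring]
        have h2 : ¬ ((2:Int) ^ (t + 1) ≤ n2 - n + 1) := by
          intro hcon
          apply hcond
          rw [hbor, pv_shift_one]
          linarith
        have hj : PySem.Int.bitLength (n2 - n + 1) - 1 ≤ t := by
          by_contra hcon
          exact h2 ((pv_pow_le_iff _ hL (t + 1)).mpr (by omega))
        have hmin : min (t + 1) (PySem.Int.bitLength (n2 - n + 1) - 1) =
            min t (PySem.Int.bitLength (n2 - n + 1) - 1) := by omega
        rw [hmin]
        exact ih hd'

-- both whole loops agree step by step as long as no multiple of 2^31 lies ahead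
lemma loop_eq (n2 : Int) :
    ∀ (fuel : Nat) (n : Int) (rules : List (Int × Int)),
      (∀ m : Int, n ≤ m → m ≤ n2 → ¬ ((2147483648 : Int) ∣ m)) →
      loopA n2 fuel n rules = loopB n2 fuel n rules := by
  intro fuel
  induction fuel with
  | zero => intro n rules _; rfl
  | succ fuel ih =>
      intro n rules h
      simp only [loopA, loopB]
      by_cases hn : n ≤ n2
      · rw [if_pos hn, if_pos hn]
        have hnd : ¬ ((2:Int) ^ 31 ∣ n) := by
          intro hc
          exact h n le_rfl hn (by rwa [show ((2:Int) ^ 31) = 2147483648 by norm_num] at hc)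
        obtain ⟨t, hsome, ht30, htd⟩ := ztn_spec n hnd
        rw [hsome]
        dsimp only
        rw [innerA_spec n2 n t hn htd]
        dsimp only
        have hbl := pv_bitLength_pos (n2 - n + 1) (by omega)
        have htn : (min ((t : Nat) : Int) ((PySem.Int.bitLength (n2 - n + 1) : Int) - 1)).toNat =
            min t (PySem.Int.bitLength (n2 - n + 1) - 1) := by
          rcases le_total t (PySem.Int.bitLength (n2 - n + 1) - 1) with hle | hle
          · rw [min_eq_left hle, min_eq_left (by omega : ((t:Nat):Int) ≤ (PySem.Int.bitLength (n2 - n + 1) : Int) - 1)]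
            exact Int.toNat_natCast t
          · rw [min_eq_right hle, min_eq_right (by omega : (PySem.Int.bitLength (n2 - n + 1) : Int) - 1 ≤ ((t:Nat):Int))]
            omega
        simp only [htn, pv_shift_one]
        apply ih
        intro m hm1 hm2
        apply h m _ hm2
        have hz : (0:Int) ≤ 2 ^ (min t (PySem.Int.bitLength (n2 - n + 1) - 1)) := by positivity
        omega
      · rw [if_neg hn, if_neg hn]

-- ===== VERDICT (by name: the statement is the Claim_ definition above) =====
theorem range2match_spec : Claim_equal_range2match := by
  intro n1 n2 _ hpre
  unfold Spec_range2match range2match range2match_alt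
  apply loop_eq
  intro m hm1 hm2 hdvd
  unfold Pre_range2match at hpre
  omega
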